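-- pv_equiv track=rewrite | github.com/mete0r/pyhwp | src/hwp5/utils.py | generate_json_array
-- ===== SOURCE A (Python) =====
-- def generate_json_array(tokens):
--     ''' generate json array with given tokens '''
--     first = True
--     for token in tokens:
--         if first:
--             yield '[\n'
--             first = False
--         else:
--             yield ',\n'
--         yield token
--     yield '\n]'
-- ===== SOURCE B (Python) =====
-- def generate_json_array(tokens):
--     ''' generate json array with given tokens '''
--     toks = list(tokens)
--     seps = ['[\n'] + [',\n'] * (len(toks) - 1)
--     out = [piece for pair in zip(seps, toks) for piece in pair]
--     out.append('\n]')
--     yield from out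
-- ===== Notes on version B (the rewrite author's own statement) =====
-- stated objective: alternative
-- what changed: Replaces the streaming loop with a per-token boolean flag by a staged construction: materialize the tokens, build a parallel separator list ('[\n' followed by n-1 copies of ',\n'), zip the two lists and flatten, append the closing '\n]', then yield the prebuilt list; trades streaming laziness for a branch-free data-parallel construction.
import Mathlib
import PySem

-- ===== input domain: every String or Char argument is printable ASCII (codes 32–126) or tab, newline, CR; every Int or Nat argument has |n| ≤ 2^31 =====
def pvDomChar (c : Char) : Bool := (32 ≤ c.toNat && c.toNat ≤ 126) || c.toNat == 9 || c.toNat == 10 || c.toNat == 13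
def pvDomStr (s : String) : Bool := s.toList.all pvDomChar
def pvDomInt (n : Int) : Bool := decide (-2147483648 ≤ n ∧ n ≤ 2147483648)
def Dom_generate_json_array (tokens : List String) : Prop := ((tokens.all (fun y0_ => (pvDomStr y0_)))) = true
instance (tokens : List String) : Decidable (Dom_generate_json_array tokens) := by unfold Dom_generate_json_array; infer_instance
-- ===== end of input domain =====

-- B replaces A's streaming loop with a `first` flag by a staged construction:
-- a separator list zipped with the tokens, flattened, closer appended (objective: alternative).

-- ===== PORT A =====
-- A: fold carrying the `first` flag; each iteration appends "[\n" or ",\n" then the token; "\n]" last.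
def generate_json_array (tokens : List String) : List String :=
  let st := tokens.foldl (fun (acc : List String × Bool) token =>
      if acc.2 then (acc.1 ++ ["[\n", token], false)
      else (acc.1 ++ [",\n", token], acc.2)) ([], true)
  st.1 ++ ["\n]"]

-- ===== PORT B =====
-- B: separator list "[\n" :: (len-1) × ",\n", zipped with tokens and flattened, then "\n]".
def generate_json_array_alt (tokens : List String) : List String :=
  let seps := "[\n" :: List.replicate (tokens.length - 1) ",\n"
  ((seps.zip tokens).flatMap (fun p => [p.1, p.2])) ++ ["\n]"]

-- ===== PRECONDITION & SPEC =====
def Spec_generate_json_array (tokens : List String) (out : List String) : Prop := out = generate_json_array_alt tokens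
instance (tokens : List String) (out : List String) : Decidable (Spec_generate_json_array tokens out) := by unfold Spec_generate_json_array; infer_instance

-- ===== CLAIM (what is proved, stated in full; the proofs are below) =====
def Claim_equal_generate_json_array : Prop := ∀ (tokens : List String), Dom_generate_json_array tokens → Spec_generate_json_array tokens (generate_json_array tokens)

-- ===== LEMMAS AND PROOFS =====
-- invariant for A's fold after the first iteration
lemma gja_fold (rest : List String) (acc : List String) :
    rest.foldl (fun (acc : List String × Bool) token =>
      if acc.2 then (acc.1 ++ ["[\n", token], false)
      else (acc.1 ++ [",\n", token], acc.2)) (acc, false)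
    = (acc ++ rest.flatMap (fun x => [",\n", x]), false) := by
  induction rest generalizing acc with
  | nil => simp
  | cons t ts ih => simp [List.foldl, ih, List.flatMap_cons]

-- B's zip-with-replicate flattening equals the per-token [",\n", x] expansion
lemma gja_zip (ts : List String) :
    ((List.replicate ts.length ",\n").zip ts).flatMap (fun p : String × String => [p.1, p.2])
    = ts.flatMap (fun x => [",\n", x]) := by
  induction ts with
  | nil => rfl
  | cons t ts ih => simp [List.replicate, List.zip_cons_cons, ih]

-- ===== VERDICT (by name: the statement is the Claim_ definition above) =====
theorem generate_json_array_spec : Claim_equal_generate_json_array := by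
  intro tokens _
  unfold Spec_generate_json_array generate_json_array generate_json_array_alt
  cases tokens with
  | nil => rfl
  | cons t ts => simp [List.foldl, gja_fold, gja_zip]
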